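-- pv_equiv track=rewrite | github.com/ElkeVSant/AdventOfCode2024 | day2/main.py | count_safe
-- ===== SOURCE A (Python) =====
-- def count_safe(levels: list[list[int]]) -> int:
--     difs = differ(levels)
--     safe_count = 0
--     for level_difs in difs:
--         if len([dif for dif in level_difs if 0 < abs(dif) < 4]) == len(
--             level_difs
--         ) and len([dif for dif in level_difs if dif > 0]) in (0, len(level_difs)):
--             safe_count += 1
--     return safe_count
--
-- def differ(levels: list[list[int]]) -> list[list[int]]:
--     return [
--         [level1 - level2 for level1, level2 in zip(level, level[1:])]
--         for level in levels
--     ]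
-- ===== SOURCE B (Python) =====
-- def count_safe(levels: list[list[int]]) -> int:
--     safe_count = 0
--     for level in levels:
--         steps_ok = all(1 <= abs(a - b) <= 3 for a, b in zip(level, level[1:]))
--         monotone = level == sorted(level) or level == sorted(level, reverse=True)
--         if steps_ok and monotone:
--             safe_count += 1
--     return safe_count
-- ===== Notes on version B (the rewrite author's own statement) =====
-- stated objective: idiomatic
-- what changed: Monotonicity is decided by comparing each level with its sorted (and reverse-sorted) copy instead of counting positive adjacent differences, and the intermediate list-of-difference-lists is never built; the step-size check folds the abs range test into one all() over adjacent pairs.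
import Mathlib
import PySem

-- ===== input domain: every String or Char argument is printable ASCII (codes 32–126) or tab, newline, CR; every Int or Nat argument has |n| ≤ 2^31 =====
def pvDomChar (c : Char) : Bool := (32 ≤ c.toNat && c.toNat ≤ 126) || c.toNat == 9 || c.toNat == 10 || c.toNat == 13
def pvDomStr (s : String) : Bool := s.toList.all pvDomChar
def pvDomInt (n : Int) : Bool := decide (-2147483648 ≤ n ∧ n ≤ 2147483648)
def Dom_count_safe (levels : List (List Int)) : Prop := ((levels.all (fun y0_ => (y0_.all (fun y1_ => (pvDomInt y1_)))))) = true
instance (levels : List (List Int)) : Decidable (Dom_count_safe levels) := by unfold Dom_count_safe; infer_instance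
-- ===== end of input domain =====

-- B decides monotonicity by comparing each level with its sorted / reverse-sorted copy instead of
-- counting positive adjacent differences, and never builds the list of difference lists (objective: idiomatic).

-- ===== PORT A =====
-- zip(level, level[1:]) is Lean's List.zip of level with level.drop 1 (exact: both truncate to the shorter list)
def differ (levels : List (List Int)) : List (List Int) :=
  levels.map (fun level => (level.zip (level.drop 1)).map (fun p => p.1 - p.2))

def count_safe (levels : List (List Int)) : Int :=
  let difs := differ levels
  difs.foldl (fun safe_count level_difs =>
    if (level_difs.filter (fun dif => decide (0 < |dif| ∧ |dif| < 4))).length = level_difs.length ∧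
       ((level_difs.filter (fun dif => decide (0 < dif))).length = 0 ∨
        (level_difs.filter (fun dif => decide (0 < dif))).length = level_difs.length)
    then safe_count + 1 else safe_count) 0

-- ===== PORT B =====
def count_safe_alt (levels : List (List Int)) : Int :=
  levels.foldl (fun safe_count level =>
    let steps_ok := (level.zip (level.drop 1)).all
      (fun p => decide (1 ≤ |p.1 - p.2| ∧ |p.1 - p.2| ≤ 3))
    let monotone := (level = PySem.List.sorted level (fun x => x)) ∨
                    (level = PySem.List.sorted level (fun x => x) true)
    if steps_ok = true ∧ monotone then safe_count + 1 else safe_count) 0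

-- ===== PRECONDITION & SPEC =====
def Spec_count_safe (levels : List (List Int)) (out : Int) : Prop := out = count_safe_alt levels
instance (levels : List (List Int)) (out : Int) : Decidable (Spec_count_safe levels out) := by unfold Spec_count_safe; infer_instance

-- ===== CLAIM (what is proved, stated in full; the proofs are below) =====
def Claim_equal_count_safe : Prop := ∀ (levels : List (List Int)), Dom_count_safe levels → Spec_count_safe levels (count_safe levels)

-- ===== LEMMAS AND PROOFS =====

-- adjacent-pair condition ⇒ Pairwise, for a transitive relation
theorem pv_pairwise_of_adj {R : Int → Int → Prop}
    (htr : ∀ a b c, R a b → R b c → R a c) :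
    ∀ (l : List Int), (∀ p ∈ l.zip (l.drop 1), R p.1 p.2) → l.Pairwise R := by
  intro l
  induction l with
  | nil => intro _; exact List.Pairwise.nil
  | cons a t ih =>
    intro h
    cases t with
    | nil => simp
    | cons b t' =>
      have hab : R a b := h (a, b) (by simp)
      have htail : List.Pairwise R (b :: t') := by
        apply ih
        intro p hp
        exact h p (by simp [List.zip] at hp ⊢; tauto)
      refine List.Pairwise.cons ?_ htail
      intro x hx
      rcases List.mem_cons.mp hx with rfl | hx'
      · exact hab
      · exact htr a b x hab (List.rel_of_pairwise_cons htail hx')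

theorem pv_adj_of_pairwise {R : Int → Int → Prop} :
    ∀ (l : List Int), l.Pairwise R → ∀ p ∈ l.zip (l.drop 1), R p.1 p.2 := by
  intro l
  induction l with
  | nil => intro _ p hp; simp at hp
  | cons a t ih =>
    intro h p hp
    cases t with
    | nil => simp at hp
    | cons b t' =>
      rcases List.pairwise_cons.mp h with ⟨hhead, htail⟩
      simp only [List.drop, List.zip] at hp
      rcases List.mem_cons.mp hp with rfl | hp'
      · exact hhead b (by simp)
      · exact ih htail p hp'

-- l equals sorted(l) iff l is pairwise ≤ (and the reverse-sorted twin)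
theorem pv_eq_sorted_iff (l : List Int) :
    l = PySem.List.sorted l (fun x => x) ↔ l.Pairwise (· ≤ ·) := by
  constructor
  · intro h
    have := PySem.List.sorted_pairwise l (fun x => x)
    rw [← h] at this
    exact this
  · intro h
    exact (PySem.List.sorted_eq_self_of_pairwise l (fun x => x) h).symm

theorem pv_eq_sorted_rev_iff (l : List Int) :
    l = PySem.List.sorted l (fun x => x) true ↔ l.Pairwise (fun a b => b ≤ a) := by
  constructor
  · intro h
    have := PySem.List.sorted_pairwise_rev l (fun x => x)
    rw [← h] at this
    exact this
  · intro h
    exact (PySem.List.sorted_rev_eq_self_of_pairwise l (fun x => x) h).symm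

-- the per-level safety conditions of the two ports agree
theorem pv_cond_iff (l : List Int) :
    ((((l.zip (l.drop 1)).map (fun p => p.1 - p.2)).filter
        (fun dif => decide (0 < |dif| ∧ |dif| < 4))).length =
      ((l.zip (l.drop 1)).map (fun p => p.1 - p.2)).length ∧
     ((((l.zip (l.drop 1)).map (fun p => p.1 - p.2)).filter (fun dif => decide (0 < dif))).length = 0 ∨
      (((l.zip (l.drop 1)).map (fun p => p.1 - p.2)).filter (fun dif => decide (0 < dif))).length =
        ((l.zip (l.drop 1)).map (fun p => p.1 - p.2)).length))
    ↔
    (((l.zip (l.drop 1)).all (fun p => decide (1 ≤ |p.1 - p.2| ∧ |p.1 - p.2| ≤ 3))) = true ∧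
     ((l = PySem.List.sorted l (fun x => x)) ∨ (l = PySem.List.sorted l (fun x => x) true))) := by
  have hrange :
      ((((l.zip (l.drop 1)).map (fun p => p.1 - p.2)).filter
          (fun dif => decide (0 < |dif| ∧ |dif| < 4))).length =
        ((l.zip (l.drop 1)).map (fun p => p.1 - p.2)).length)
      ↔ (∀ p ∈ l.zip (l.drop 1), 1 ≤ |p.1 - p.2| ∧ |p.1 - p.2| ≤ 3) := by
    rw [List.length_filter_eq_length_iff, List.forall_mem_map]
    constructor
    · intro h p hp; have := h p hp
      simp only [decide_eq_true_eq, Int.abs_eq_natAbs] at this ⊢; omega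
    · intro h p hp; have := h p hp
      simp only [decide_eq_true_eq, Int.abs_eq_natAbs] at this ⊢; omega
  have hall :
      (((l.zip (l.drop 1)).all (fun p => decide (1 ≤ |p.1 - p.2| ∧ |p.1 - p.2| ≤ 3))) = true)
      ↔ (∀ p ∈ l.zip (l.drop 1), 1 ≤ |p.1 - p.2| ∧ |p.1 - p.2| ≤ 3) := by
    simp [List.all_eq_true]
  have hzero :
      ((((l.zip (l.drop 1)).map (fun p => p.1 - p.2)).filter (fun dif => decide (0 < dif))).length = 0)
      ↔ (∀ p ∈ l.zip (l.drop 1), p.1 ≤ p.2) := by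
    rw [List.length_eq_zero_iff, List.filter_eq_nil_iff, List.forall_mem_map]
    constructor
    · intro h p hp; have := h p hp; simp only [decide_eq_true_eq] at this; omega
    · intro h p hp; have := h p hp; simp only [decide_eq_true_eq]; omega
  have hfull :
      ((((l.zip (l.drop 1)).map (fun p => p.1 - p.2)).filter (fun dif => decide (0 < dif))).length =
        ((l.zip (l.drop 1)).map (fun p => p.1 - p.2)).length)
      ↔ (∀ p ∈ l.zip (l.drop 1), p.2 < p.1) := by
    rw [List.length_filter_eq_length_iff, List.forall_mem_map]
    constructor
    · intro h p hp; have := h p hp; simp only [decide_eq_true_eq] at this; omega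
    · intro h p hp; have := h p hp; simp only [decide_eq_true_eq]; omega
  rw [hrange, hall, hzero, hfull, pv_eq_sorted_iff, pv_eq_sorted_rev_iff]
  constructor
  · rintro ⟨hr, hd⟩
    refine ⟨hr, ?_⟩
    rcases hd with h0 | hn
    · exact Or.inl (pv_pairwise_of_adj (R := fun a b => a ≤ b) (fun a b c hab hbc => le_trans hab hbc) l h0)
    · exact Or.inr ((pv_pairwise_of_adj (R := fun a b => b < a)
        (fun a b c hab hbc => lt_trans hbc hab) l hn).imp (fun h => le_of_lt h))
  · rintro ⟨hr, hd⟩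
    refine ⟨hr, ?_⟩
    rcases hd with hasc | hdesc
    · exact Or.inl (pv_adj_of_pairwise l hasc)
    · refine Or.inr ?_
      intro p hp
      have hle : p.2 ≤ p.1 := pv_adj_of_pairwise l hdesc p hp
      have hne := (hr p hp).1
      rw [Int.abs_eq_natAbs] at hne
      omega

-- ===== VERDICT (by name: the statement is the Claim_ definition above) =====
theorem count_safe_spec : Claim_equal_count_safe := by
  intro levels _
  unfold Spec_count_safe count_safe count_safe_alt differ
  rw [List.foldl_map]
  apply congrFun
  apply congrFun
  apply congrArg
  funext safe_count level
  exact if_congr (pv_cond_iff level) rfl rfl
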